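-- pv_equiv track=rewrite | github.com/sloppyjuicy/docs-1 | tools/tensorflow_docs/api_generator/gen_java/processing.py | add_package_headings
-- ===== SOURCE A (Python) =====
-- from typing import Any, Iterable, Mapping, Sequence
--
-- Toc = Mapping[str, Sequence[Mapping[str, Any]]]
--
-- def add_package_headings(toc: Toc, root_pkgs: Iterable[str],
--                          labels: Mapping[str, str]) -> Toc:
--   """Breaks up a flat structure with headings for each 1st-level package."""
--   new_toc = []
--   current_section = None
--   for entry in sort_toc(toc, labels.keys())['toc']:
--     new_entry = dict(entry)
--     for root_pkg in root_pkgs: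
--       if new_entry.get('title', '').startswith(root_pkg):
--         # Strip the common root_pkg from the title.
--         new_title = new_entry['title'][len(root_pkg):].lstrip('.')
--         # The section label is the first sub-package (this.notthis.orthis)
--         section, *_ = new_title.split('.')
--         if section != current_section:
--           # We've hit a new section, add a label if one was supplied.
--           section_pkg = f'{root_pkg}.{section}' if section else root_pkg
--           new_toc.append({'heading': labels.get(section_pkg, section)})
--           current_section = section
--
--         new_entry['title'] = new_title or root_pkg
--     new_toc.append(new_entry)
--   return {'toc': new_toc}
--
-- def sort_toc(toc: Toc, labels: Iterable[str]) -> Toc: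
--   """Pre-sort the TOC entries by `labels`."""
--   new_toc = []
--   remaining_entries = list(toc.get('toc', []))
--   for label in labels:
--     more_specific_labels = [l for l in labels if len(l) > len(label)]
--     for entry in remaining_entries[:]:  # copy so we can remove() later
--       title = entry.get('title', '')
--       better_match_exists = any(
--           [title.startswith(l) for l in more_specific_labels])
--       if title.startswith(label) and not better_match_exists:
--         new_toc.append(entry)
--         # Remove the matched entry so it doesn't duplicate, and so we can track
--         # any un-matched entries.
--         remaining_entries.remove(entry)
--
--   return {'toc': new_toc + remaining_entries}
-- ===== SOURCE B (Python) =====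
-- def add_package_headings(toc, root_pkgs, labels):
--   """Same result as A: bucket entries by their longest matching label in one pass, then head sections."""
--   ks = list(labels)
--   entries = list(toc.get('toc', []))
--   buckets = [[] for _ in ks]
--   rest = []
--   for entry in entries:
--     title = entry.get('title', '')
--     best = -1
--     best_len = -1
--     for i, lab in enumerate(ks):
--       if len(lab) > best_len and title.startswith(lab):
--         best, best_len = i, len(lab)
--     (buckets[best] if best >= 0 else rest).append(entry)
--   ordered = [e for b in buckets for e in b] + rest
--   new_toc = []
--   cur = None
--   for entry in ordered:
--     t = entry.get('title', '')
--     matched = False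
--     for rp in root_pkgs:
--       if t.startswith(rp):
--         matched = True
--         nt = t[len(rp):].lstrip('.')
--         section = nt.split('.', 1)[0]
--         if section != cur:
--           key = f'{rp}.{section}' if section else rp
--           new_toc.append({'heading': labels.get(key, section)})
--           cur = section
--         t = nt or rp
--     e2 = dict(entry)
--     if matched:
--       e2['title'] = t
--     new_toc.append(e2)
--   return {'toc': new_toc}
-- ===== Notes on version B (the rewrite author's own statement) =====
-- stated objective: faster
-- what changed: sort_toc's nested label-by-label rescans of labels and of the shrinking remaining-entries list (with list.remove) are replaced by one scan per entry that finds its best (longest, earliest) matching label and stable bucketing by label index; the heading pass tracks the working title in a variable instead of repeatedly mutating and re-reading the copied entry dict.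
import Mathlib
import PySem

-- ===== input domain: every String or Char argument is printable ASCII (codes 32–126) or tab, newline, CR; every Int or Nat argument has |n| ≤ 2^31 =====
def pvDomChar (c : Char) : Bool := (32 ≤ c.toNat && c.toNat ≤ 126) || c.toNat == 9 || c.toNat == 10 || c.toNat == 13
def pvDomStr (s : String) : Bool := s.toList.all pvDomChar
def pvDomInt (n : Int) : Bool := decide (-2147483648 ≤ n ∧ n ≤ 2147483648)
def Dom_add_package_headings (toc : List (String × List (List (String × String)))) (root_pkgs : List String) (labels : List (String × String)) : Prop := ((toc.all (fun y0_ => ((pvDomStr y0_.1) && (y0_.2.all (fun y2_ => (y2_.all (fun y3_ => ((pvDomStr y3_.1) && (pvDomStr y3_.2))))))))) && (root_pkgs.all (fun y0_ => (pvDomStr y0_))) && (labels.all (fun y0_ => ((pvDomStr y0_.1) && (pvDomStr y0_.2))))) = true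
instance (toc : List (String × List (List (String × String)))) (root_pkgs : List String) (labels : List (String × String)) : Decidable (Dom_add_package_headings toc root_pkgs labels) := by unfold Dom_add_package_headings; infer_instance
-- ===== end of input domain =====

-- B re-sorts the TOC by assigning each entry its best (longest, earliest) matching label in ONE scan of the
-- labels per entry and bucketing stably, instead of A's label×label×entries nested rescans; same return value.

-- shared small pieces of Python both sources contain verbatim: entry.get('title',''), s.lstrip('.')
def pvTitle (e : List (String × String)) : String := (PySem.Dict.mk e).getD "title" ""
-- s.lstrip('.') : exact — drops exactly the leading '.' code points
def pvLstripDot (s : String) : String := String.ofList (s.toList.dropWhile (· == '.'))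

-- ===== PORT A =====
-- helper sort_toc, transliterated: outer loop over labels, inner loop over a copy of
-- remaining_entries with remove(); remove() never misses (the entry is in the list), so getD keeps it total.
def pvSortTocA (toc : List (String × List (List (String × String)))) (ks : List String) : List (String × List (List (String × String))) :=
  let remaining0 := (PySem.Dict.mk toc).getD "toc" []
  let st := ks.foldl (fun (st : List (List (String × String)) × List (List (String × String))) label =>
    let msl := ks.filter (fun l => PySem.Str.len l > PySem.Str.len label)
    st.2.foldl (fun st2 entry =>
      let title := pvTitle entry
      let better := msl.any (fun l => PySem.Str.startswith title l)
      if PySem.Str.startswith title label && !better then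
        (st2.1 ++ [entry], (PySem.List.remove? st2.2 entry).getD st2.2)
      else st2) (st.1, st.2)) ([], remaining0)
  [("toc", st.1 ++ st.2)]

def add_package_headings (toc : List (String × List (List (String × String)))) (root_pkgs : List String) (labels : List (String × String)) : List (String × List (List (String × String))) :=
  let ks := PySem.List.dedup (labels.map (fun p => p.1))   -- labels.keys()
  let sortedEntries := (PySem.Dict.mk (pvSortTocA toc ks)).getD "toc" []
  let res := sortedEntries.foldl (fun (st : List (List (String × String)) × Option String) entry =>
    let inner := root_pkgs.foldl
      (fun (s2 : PySem.Dict String String × List (List (String × String)) × Option String) root_pkg =>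
        if PySem.Str.startswith (s2.1.getD "title" "") root_pkg then
          -- new_entry['title'] : under Pre_ the key is present, so getD "" reads the same value
          let new_title := pvLstripDot (PySem.Str.slice (s2.1.getD "title" "") (some (PySem.Str.len root_pkg)) none)
          -- sec, *_ = new_title.split('.') : sep ≠ '' and split never yields [], so getD/headD are exact
          let sec := ((PySem.Str.split? new_title ".").getD []).headD ""
          let oc :=
            if some sec ≠ s2.2.2 then
              let section_pkg := if sec ≠ "" then PySem.Str.join "" [root_pkg, ".", sec] else root_pkg
              (s2.2.1 ++ [[("heading", (PySem.Dict.mk labels).getD section_pkg sec)]], some sec)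
            else (s2.2.1, s2.2.2)
          (s2.1.insert "title" (if new_title = "" then root_pkg else new_title), oc.1, oc.2)
        else s2)
      (PySem.Dict.mk entry, st.1, st.2)
    (inner.2.1 ++ [inner.1.items], inner.2.2)) ([], none)
  [("toc", res.1)]

-- ===== PORT B =====
-- scan of the label list tracking (best index, best length): first label of maximal matching length
def pvBestScan (ks : List String) (title : String) : Int × Int :=
  (PySem.List.enumerate ks).foldl
    (fun (st : Int × Int) il =>
      if PySem.Str.len il.2 > st.2 && PySem.Str.startswith title il.2 then (il.1, PySem.Str.len il.2) else st)
    (-1, -1)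

def add_package_headings_alt (toc : List (String × List (List (String × String)))) (root_pkgs : List String) (labels : List (String × String)) : List (String × List (List (String × String))) :=
  let ks := PySem.List.dedup (labels.map (fun p => p.1))
  let entries := (PySem.Dict.mk toc).getD "toc" []
  let br := entries.foldl (fun (st : List (List (List (String × String))) × List (List (String × String))) entry =>
      let best := (pvBestScan ks (pvTitle entry)).1
      if best ≥ 0 then (st.1.set best.toNat ((st.1.getD best.toNat []) ++ [entry]), st.2)
      else (st.1, st.2 ++ [entry]))
    (ks.map (fun _ => []), [])
  let ordered := br.1.flatten ++ br.2
  let res := ordered.foldl (fun (st : List (List (String × String)) × Option String) entry =>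
    let inner := root_pkgs.foldl
      (fun (s : String × Bool × List (List (String × String)) × Option String) rp =>
        if PySem.Str.startswith s.1 rp then
          let nt := pvLstripDot (PySem.Str.slice s.1 (some (PySem.Str.len rp)) none)
          let sec := ((PySem.Str.split? nt ".").getD []).headD ""
          let oc :=
            if some sec ≠ s.2.2.2 then
              let key := if sec ≠ "" then PySem.Str.join "" [rp, ".", sec] else rp
              (s.2.2.1 ++ [[("heading", (PySem.Dict.mk labels).getD key sec)]], some sec)
            else (s.2.2.1, s.2.2.2)
          ((if nt = "" then rp else nt), true, oc.1, oc.2)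
        else s)
      (pvTitle entry, false, st.1, st.2)
    let e2 := if inner.2.1 then (PySem.Dict.mk entry).insert "title" inner.1 else PySem.Dict.mk entry
    (inner.2.2.1 ++ [e2.items], inner.2.2.2)) ([], none)
  [("toc", res.1)]

-- ===== PRECONDITION & SPEC =====
-- Pre_ excludes exactly the inputs where A raises KeyError: an empty root package together with a
-- TOC entry that has no 'title' key (then ''.startswith('') fires and entry['title'] raises).
def Pre_add_package_headings (toc : List (String × List (List (String × String)))) (root_pkgs : List String) (labels : List (String × String)) : Prop :=
  "" ∈ root_pkgs → ∀ e ∈ (PySem.Dict.mk toc).getD "toc" [], "title" ∈ e.map (fun p => p.1)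
instance (toc : List (String × List (List (String × String)))) (root_pkgs : List String) (labels : List (String × String)) : Decidable (Pre_add_package_headings toc root_pkgs labels) := by unfold Pre_add_package_headings; infer_instance
def pvWitness_add_package_headings : (List (String × List (List (String × String)))) × List String × (List (String × String)) :=
  ([("toc", [[("title", "a.b.c")], [("title", "x")]])], ["a"], [("a.b", "B label")])

def Spec_add_package_headings (toc : List (String × List (List (String × String)))) (root_pkgs : List String) (labels : List (String × String)) (out : List (String × List (List (String × String)))) : Prop := out = add_package_headings_alt toc root_pkgs labels
instance (toc : List (String × List (List (String × String)))) (root_pkgs : List String) (labels : List (String × String)) (out : List (String × List (List (String × String)))) : Decidable (Spec_add_package_headings toc root_pkgs labels out) := by unfold Spec_add_package_headings; infer_instance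

-- ===== CLAIM (what is proved, stated in full; the proofs are below) =====
def Claim_equal_add_package_headings : Prop := ∀ (toc : List (String × List (List (String × String)))) (root_pkgs : List String) (labels : List (String × String)), Dom_add_package_headings toc root_pkgs labels → Pre_add_package_headings toc root_pkgs labels → Spec_add_package_headings toc root_pkgs labels (add_package_headings toc root_pkgs labels)
-- ===== LEMMAS AND PROOFS =====
abbrev PvE := List (String × String)

-- 'good' label: title starts with it and no strictly longer label of ks also matches
def pvGT (ks : List String) (label : String) (t : String) : Bool :=
  PySem.Str.startswith t label &&
    !((ks.filter (fun l => PySem.Str.len l > PySem.Str.len label)).any (fun l => PySem.Str.startswith t l))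

-- first good label index / maximal matching length
def pvFg (ks : List String) (t : String) : Option Nat := ks.findIdx? (fun l => pvGT ks l t)
def pvMlen (ks : List String) (t : String) : Int :=
  ks.foldl (fun m l => if PySem.Str.len l > m && PySem.Str.startswith t l then PySem.Str.len l else m) (-1)

-- canonical sequential bucketing (what sort_toc computes)
def pvSpecAux (ks : List String) : List String → List PvE → List PvE × List PvE
  | [], rem => ([], rem)
  | l :: ls, rem =>
    let r := pvSpecAux ks ls (rem.filter (fun e => !pvGT ks l (pvTitle e)))
    (rem.filter (fun e => pvGT ks l (pvTitle e)) ++ r.1, r.2)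

def pvOuterStepA (ks : List String) (st : List PvE × List PvE) (label : String) : List PvE × List PvE :=
  let msl := ks.filter (fun l => PySem.Str.len l > PySem.Str.len label)
  st.2.foldl (fun st2 entry =>
      let title := pvTitle entry
      let better := msl.any (fun l => PySem.Str.startswith title l)
      if PySem.Str.startswith title label && !better then
        (st2.1 ++ [entry], (PySem.List.remove? st2.2 entry).getD st2.2)
      else st2) (st.1, st.2)

lemma pvSortTocA_eq (toc : List (String × List PvE)) (ks : List String) :
    pvSortTocA toc ks =
      [("toc", (ks.foldl (pvOuterStepA ks) ([], (PySem.Dict.mk toc).getD "toc" [])).1 ++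
               (ks.foldl (pvOuterStepA ks) ([], (PySem.Dict.mk toc).getD "toc" [])).2)] := rfl

def pvIStep (ks : List String) (label : String) (st2 : List PvE × List PvE) (entry : PvE) : List PvE × List PvE :=
  if pvGT ks label (pvTitle entry) = true then
    (st2.1 ++ [entry], (PySem.List.remove? st2.2 entry).getD st2.2)
  else st2

lemma pvIStep_pos {ks label} {e : PvE} (h : pvGT ks label (pvTitle e) = true) (acc l : List PvE) :
    pvIStep ks label (acc, l) e = (acc ++ [e], (PySem.List.remove? l e).getD l) := by
  simp [pvIStep, h]

lemma pvIStep_neg {ks label} {e : PvE} (h : pvGT ks label (pvTitle e) = false) (st : List PvE × List PvE) :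
    pvIStep ks label st e = st := by
  simp [pvIStep, h]

lemma pvInnerA (ks : List String) (label : String) :
    ∀ (r acc pre : List PvE), (∀ e ∈ pre, pvGT ks label (pvTitle e) = false) →
      r.foldl (pvIStep ks label) (acc, pre ++ r)
      = (acc ++ r.filter (fun e => pvGT ks label (pvTitle e)),
         pre ++ r.filter (fun e => !pvGT ks label (pvTitle e))) := by
  intro r
  induction r with
  | nil => intro acc pre _; simp
  | cons e r ih =>
    intro acc pre hpre
    by_cases hc : pvGT ks label (pvTitle e) = true
    · have hne : e ∉ pre := fun hmem => by simp [hpre e hmem] at hc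
      have hrem : (PySem.List.remove? (pre ++ e :: r) e).getD (pre ++ e :: r) = pre ++ r := by
        rw [PySem.List.remove?_eq_some_erase _ e (by simp)]
        simp [List.erase_append_right _ hne]
      rw [List.foldl_cons, pvIStep_pos hc, hrem, ih (acc ++ [e]) pre hpre]
      simp [hc]
    · have hc' : pvGT ks label (pvTitle e) = false := by simpa using hc
      have hpre' : ∀ x ∈ pre ++ [e], pvGT ks label (pvTitle x) = false := by
        intro x hx
        rcases List.mem_append.mp hx with h | h
        · exact hpre x h
        · simpa [List.mem_singleton.mp h] using hc'
      rw [List.foldl_cons, pvIStep_neg hc', show pre ++ e :: r = (pre ++ [e]) ++ r by simp,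
        ih acc (pre ++ [e]) hpre']
      simp [hc']

lemma pvOuterStepA_eq (ks : List String) (st : List PvE × List PvE) (label : String) :
    pvOuterStepA ks st label =
      (st.1 ++ st.2.filter (fun e => pvGT ks label (pvTitle e)),
       st.2.filter (fun e => !pvGT ks label (pvTitle e))) := by
  have e0 : pvOuterStepA ks st label = st.2.foldl (pvIStep ks label) (st.1, st.2) := rfl
  have h := pvInnerA ks label st.2 st.1 [] (by simp)
  rw [e0]
  simpa using h

lemma pvOuterA (ks : List String) :
    ∀ (ls : List String) (acc rem : List PvE),
      ls.foldl (pvOuterStepA ks) (acc, rem)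
        = (acc ++ (pvSpecAux ks ls rem).1, (pvSpecAux ks ls rem).2) := by
  intro ls
  induction ls with
  | nil => intro acc rem; simp [pvSpecAux]
  | cons l ls ih =>
    intro acc rem
    simp only [List.foldl_cons, pvOuterStepA_eq, pvSpecAux, ih, List.append_assoc]

-- B-side: characterise the (best index, best length) scan
lemma pvEnum_append {α : Type} (xs : List α) (x : α) :
    ∀ s : Int, PySem.List.enumerate (xs ++ [x]) s = PySem.List.enumerate xs s ++ [(s + xs.length, x)] := by
  induction xs with
  | nil => intro s; simp [PySem.List.enumerate_cons, PySem.List.enumerate_nil]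
  | cons y ys ih =>
    intro s
    simp only [List.cons_append, PySem.List.enumerate_cons, ih (s + 1), List.length_cons,
      Nat.cast_add, Nat.cast_one]
    ring_nf

lemma pvMlen_append (ks : List String) (l : String) (t : String) :
    pvMlen (ks ++ [l]) t =
      if PySem.Str.len l > pvMlen ks t && PySem.Str.startswith t l then PySem.Str.len l
      else pvMlen ks t := by
  simp [pvMlen, List.foldl_append]

lemma pvMlen_ge (t : String) : ∀ (ks : List String), ∀ l ∈ ks,
    PySem.Str.startswith t l = true → PySem.Str.len l ≤ pvMlen ks t := by
  intro ks
  induction ks using List.reverseRecOn with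
  | nil => simp
  | append_singleton ks x ih =>
    intro l hl hsw
    rw [pvMlen_append]
    rcases List.mem_append.mp hl with h | h
    · have := ih l h hsw
      split_ifs with hg
      · simp only [Bool.and_eq_true, decide_eq_true_eq, gt_iff_lt] at hg
        omega
      · exact this
    · have hx : l = x := by simpa using h
      subst hx
      split_ifs with hg
      · exact le_refl _
      · have hb : ¬ PySem.Str.len l > pvMlen ks t := by
          intro hlt
          apply hg
          simp only [Bool.and_eq_true, decide_eq_true_eq]
          exact ⟨hlt, hsw⟩
        omega

lemma pvMlen_cases (t : String) : ∀ (ks : List String),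
    pvMlen ks t = -1 ∨ ∃ l ∈ ks, PySem.Str.startswith t l = true ∧ PySem.Str.len l = pvMlen ks t := by
  intro ks
  induction ks using List.reverseRecOn with
  | nil => left; rfl
  | append_singleton ks x ih =>
    rw [pvMlen_append]
    split_ifs with hg
    · right
      exact ⟨x, by simp, by simp only [Bool.and_eq_true] at hg; exact hg.2, rfl⟩
    · rcases ih with h | ⟨l, hl, hsw, hlen⟩
      · left; exact h
      · right; exact ⟨l, by simp [hl], hsw, hlen⟩

lemma pvFindIdx?_congr {α : Type} (p q : α → Bool) :
    ∀ xs : List α, (∀ x ∈ xs, p x = q x) → xs.findIdx? p = xs.findIdx? q := by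
  intro xs
  induction xs with
  | nil => intro _; rfl
  | cons x xs ih =>
    intro h
    rw [List.findIdx?_cons, List.findIdx?_cons, h x (by simp), ih (fun y hy => h y (by simp [hy]))]

lemma pvGT_append (ks : List String) (l label t : String) :
    pvGT (ks ++ [l]) label t =
      (pvGT ks label t &&
        !(decide (PySem.Str.len l > PySem.Str.len label) && PySem.Str.startswith t l)) := by
  have h1 : (List.filter (fun l' => PySem.Str.len l' > PySem.Str.len label) [l]).any
      (fun l' => PySem.Str.startswith t l')
      = (decide (PySem.Str.len l > PySem.Str.len label) && PySem.Str.startswith t l) := by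
    by_cases hd : label.length < l.length
    · simp [hd]
    · simp [hd]
  simp only [pvGT, List.filter_append, List.any_append, h1, Bool.not_or, Bool.and_assoc]

lemma pvExistsGood (ks : List String) (t : String) (l : String) (hl : l ∈ ks)
    (hsw : PySem.Str.startswith t l = true) : ∃ i, pvFg ks t = some i := by
  rcases pvMlen_cases t ks with h | ⟨lm, hlm, hswm, hlen⟩
  · have h1 := pvMlen_ge t ks l hl hsw
    have h2 : (0:Int) ≤ PySem.Str.len l := by simp
    omega
  · have hgood : pvGT ks lm t = true := by
      simp only [pvGT, Bool.and_eq_true, Bool.not_eq_true', hswm, true_and]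
      rw [List.any_eq_false]
      intro x hx
      simp only [List.mem_filter, decide_eq_true_eq, gt_iff_lt] at hx
      by_cases hsx : PySem.Str.startswith t x = true
      · have := pvMlen_ge t ks x hx.1 hsx
        omega
      · simpa using hsx
    have : (ks.findIdx? (fun l' => pvGT ks l' t)).isSome := by
      rw [List.findIdx?_isSome, List.any_eq_true]
      exact ⟨lm, hlm, hgood⟩
    rcases Option.isSome_iff_exists.mp this with ⟨i, hi⟩
    exact ⟨i, hi⟩

lemma pvGT_false_of_not_match {ks : List String} {label t : String}
    (h : PySem.Str.startswith t label = false) : pvGT ks label t = false := by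
  simp only [pvGT, h, Bool.false_and]

lemma pvLen_ge_mlen_of_good {ks : List String} {l t : String} (hl : l ∈ ks)
    (hg : pvGT ks l t = true) : pvMlen ks t ≤ PySem.Str.len l := by
  rcases pvMlen_cases t ks with hm | ⟨lm, hlm, hswm, hlenm⟩
  · have hsw : PySem.Str.startswith t l = true := by
      simp only [pvGT, Bool.and_eq_true] at hg
      exact hg.1
    have h1 := pvMlen_ge t ks l hl hsw
    have h0 : (0:Int) ≤ PySem.Str.len l := by simp
    omega
  · by_contra hcon
    rw [not_le] at hcon
    have hlt : PySem.Str.len l < PySem.Str.len lm := by omega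
    have : (ks.filter (fun l' => PySem.Str.len l' > PySem.Str.len l)).any
        (fun l' => PySem.Str.startswith t l') = true := by
      rw [List.any_eq_true]
      refine ⟨lm, ?_, hswm⟩
      simp only [List.mem_filter, decide_eq_true_eq, gt_iff_lt]
      exact ⟨hlm, hlt⟩
    rw [pvGT] at hg
    rw [this] at hg
    simp at hg

lemma pvNoMatch_of_fg_none {ks : List String} {t : String} (h : pvFg ks t = none) :
    ∀ l ∈ ks, PySem.Str.startswith t l = false := by
  intro l hl
  by_contra hcon
  have hsw : PySem.Str.startswith t l = true := by simpa using hcon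
  rcases pvExistsGood ks t l hl hsw with ⟨i, hi⟩
  rw [h] at hi
  simp at hi

def pvScanStep (t : String) (st : Int × Int) (il : Int × String) : Int × Int :=
  if PySem.Str.len il.2 > st.2 && PySem.Str.startswith t il.2 then (il.1, PySem.Str.len il.2) else st

lemma pvBestScan_as_foldl (ks : List String) (t : String) :
    pvBestScan ks t = (PySem.List.enumerate ks).foldl (pvScanStep t) (-1, -1) := rfl

lemma pvBestScan_eq (t : String) : ∀ (ks : List String),
    pvBestScan ks t = ((pvFg ks t).elim (-1 : Int) (fun i => (i : Int)), pvMlen ks t) := by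
  intro ks
  induction ks using List.reverseRecOn with
  | nil => rfl
  | append_singleton ks x ih =>
    have ih2 : (pvBestScan ks t).2 = pvMlen ks t := by rw [ih]
    have hstep : pvBestScan (ks ++ [x]) t
        = pvScanStep t (pvBestScan ks t) ((0:Int) + (ks.length:Int), x) := by
      rw [pvBestScan_as_foldl (ks ++ [x]), pvEnum_append, List.foldl_append, List.foldl_cons,
        List.foldl_nil, ← pvBestScan_as_foldl]
    rw [hstep]
    unfold pvScanStep
    rw [ih2, ih, pvMlen_append]
    split_ifs with hg
    · have hg' := hg
      simp only [Bool.and_eq_true, decide_eq_true_eq, gt_iff_lt] at hg'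
      -- every label of ks stops being good (x is a strictly longer match); x itself is good
      have hnone : (ks.findIdx? (fun l => pvGT (ks ++ [x]) l t)) = none := by
        rw [List.findIdx?_eq_none_iff]
        intro l hl
        rw [pvGT_append]
        by_cases hswl : PySem.Str.startswith t l = true
        · have hle := pvMlen_ge t ks l hl hswl
          have hgt : decide (PySem.Str.len x > PySem.Str.len l) = true :=
            decide_eq_true (by omega)
          rw [hgt, hg'.2]
          simp
        · simp [pvGT_false_of_not_match (by simpa using hswl)]
      have hx : pvGT (ks ++ [x]) x t = true := by
        rw [pvGT_append]
        have h1 : pvGT ks x t = true := by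
          rw [pvGT]
          rw [Bool.and_eq_true]
          refine ⟨hg'.2, ?_⟩
          rw [Bool.not_eq_true', List.any_eq_false]
          intro y hy
          rw [List.mem_filter] at hy
          have hylen : PySem.Str.len y > PySem.Str.len x := of_decide_eq_true hy.2
          by_cases hsy : PySem.Str.startswith t y = true
          · have hle := pvMlen_ge t ks y hy.1 hsy
            exact absurd hle (by omega)
          · simpa using hsy
        simp [h1]
      have hfg : pvFg (ks ++ [x]) t = some ks.length := by
        unfold pvFg
        rw [List.findIdx?_append, hnone]
        simp [List.findIdx?_cons, hx]
      simp [hfg]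
    · have hg' : (decide (PySem.Str.len x > pvMlen ks t) && PySem.Str.startswith t x) = false := by
        simpa using hg
      -- the appended label changes nothing
      have hcongr : ks.findIdx? (fun l => pvGT (ks ++ [x]) l t)
          = ks.findIdx? (fun l => pvGT ks l t) := by
        apply pvFindIdx?_congr
        intro l hl
        rw [pvGT_append]
        by_cases hgl : pvGT ks l t = true
        · have hlge := pvLen_ge_mlen_of_good hl hgl
          have hextra : (decide (PySem.Str.len x > PySem.Str.len l)
              && PySem.Str.startswith t x) = false := by
            by_cases hsx : PySem.Str.startswith t x = true
            · have hd : decide (PySem.Str.len x > pvMlen ks t) = false := by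
                cases hdd : decide (PySem.Str.len x > pvMlen ks t)
                · rfl
                · rw [hdd, hsx] at hg'
                  simp at hg'
              have hxle : ¬ PySem.Str.len x > pvMlen ks t := of_decide_eq_false hd
              have hdl : decide (PySem.Str.len x > PySem.Str.len l) = false :=
                decide_eq_false (by omega)
              rw [hdl]
              simp
            · rw [(show PySem.Str.startswith t x = false by simpa using hsx)]
              simp
          rw [hextra]
          simp
        · simp only [Bool.not_eq_true] at hgl
          simp [hgl]
      have hfg : pvFg (ks ++ [x]) t = pvFg ks t := by
        unfold pvFg
        rw [List.findIdx?_append, hcongr]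
        rcases hresk : ks.findIdx? (fun l => pvGT ks l t) with _ | i
        · have hnm := pvNoMatch_of_fg_none (t := t) (ks := ks) hresk
          have hmlen : pvMlen ks t = -1 := by
            rcases pvMlen_cases t ks with h | ⟨l, hl, hsw, _⟩
            · exact h
            · exfalso
              have hsw' : PySem.Str.startswith t l = true := by simpa using hsw
              rw [hnm l hl] at hsw'
              exact Bool.noConfusion hsw'
          have hswx : PySem.Str.startswith t x = false := by
            cases hsx : PySem.Str.startswith t x
            · rfl
            · exfalso
              rw [hmlen, hsx] at hg'
              have hdt : decide (PySem.Str.len x > (-1:Int)) = true := decide_eq_true (by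
                have h0 : (0:Int) ≤ PySem.Str.len x := by simp
                omega)
              rw [hdt] at hg'
              simp at hg'
          have hxf : pvGT (ks ++ [x]) x t = false := pvGT_false_of_not_match hswx
          simp [List.findIdx?_cons, hxf]
        · simp
      rw [hfg]

-- B-side: the bucketing fold
def pvBStep (ks : List String) (st : List (List PvE) × List PvE) (entry : PvE) :
    List (List PvE) × List PvE :=
  let best := (pvBestScan ks (pvTitle entry)).1
  if best ≥ 0 then (st.1.set best.toNat ((st.1.getD best.toNat []) ++ [entry]), st.2)
  else (st.1, st.2 ++ [entry])

lemma pvBStep_eq (ks : List String) (st : List (List PvE) × List PvE) (e : PvE) :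
    pvBStep ks st e = (match pvFg ks (pvTitle e) with
      | some i => (st.1.set i ((st.1.getD i []) ++ [e]), st.2)
      | none => (st.1, st.2 ++ [e])) := by
  unfold pvBStep
  rw [pvBestScan_eq]
  cases h : pvFg ks (pvTitle e) with
  | none => simp
  | some i => simp

lemma pvFg_lt (ks : List String) (t : String) {i : Nat} (h : pvFg ks t = some i) :
    i < ks.length := by
  unfold pvFg at h
  exact List.findIdx?_eq_some_iff_findIdx_eq.mp h |>.1

lemma pvBuckets (ks : List String) :
    ∀ (entries : List PvE) (bk0 : List (List PvE)) (r0 : List PvE), bk0.length = ks.length →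
      entries.foldl (pvBStep ks) (bk0, r0)
        = (bk0.mapIdx (fun i b => b ++ entries.filter (fun e => pvFg ks (pvTitle e) = some i)),
           r0 ++ entries.filter (fun e => (pvFg ks (pvTitle e)).isNone)) := by
  intro entries
  induction entries with
  | nil =>
    intro bk0 r0 _
    simp only [List.foldl_nil, List.filter_nil, List.append_nil]
    refine Prod.ext ?_ rfl
    apply List.ext_getElem
    · simp
    · intro i h1 h2
      simp [List.getElem_mapIdx]
  | cons e es ih =>
    intro bk0 r0 hlen
    rw [List.foldl_cons, pvBStep_eq]
    cases hfg : pvFg ks (pvTitle e) with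
    | some i =>
      have hi : i < bk0.length := hlen ▸ pvFg_lt ks (pvTitle e) hfg
      rw [ih (bk0.set i ((bk0.getD i []) ++ [e])) r0 (by simpa using hlen)]
      refine Prod.ext ?_ ?_
      · apply List.ext_getElem
        · simp
        · intro j h1 h2
          simp only [List.getElem_mapIdx, List.getElem_set]
          by_cases hj : i = j
          · subst hj
            rw [if_pos rfl, List.getD_eq_getElem bk0 [] hi,
              List.filter_cons_of_pos (by simp [hfg]), List.append_assoc, List.singleton_append]
          · rw [if_neg hj, List.filter_cons_of_neg (by simp [hfg]; omega)]
      · simp [hfg]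
    | none =>
      rw [ih bk0 (r0 ++ [e]) hlen]
      refine Prod.ext ?_ ?_
      · rw [List.mapIdx_eq_mapIdx_iff]
        intro j hj
        rw [List.filter_cons_of_neg (by simp [hfg])]
      · rw [List.filter_cons_of_pos (by simp [hfg]), List.append_assoc, List.singleton_append]

-- label-indexed first-good lookup, and its agreement with the index form on nodup labels
lemma pvFindIdx?_find? {α : Type} [DecidableEq α] (p : α → Bool) :
    ∀ (ks : List α), ks.Nodup → ∀ (i : Nat) (h : i < ks.length),
      (ks.findIdx? p = some i ↔ ks.find? p = some ks[i]) := by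
  intro ks
  induction ks with
  | nil => intro _ i h; simp at h
  | cons k ks ih =>
    intro hnd i h
    rw [List.findIdx?_cons]
    by_cases hp : p k = true
    · rw [if_pos hp, List.find?_cons_of_pos hp]
      cases i with
      | zero => simp
      | succ j =>
        simp only [List.getElem_cons_succ]
        constructor
        · intro hh; simp at hh
        · intro hh
          have : k ∈ ks := by
            have := (Option.some.injEq _ _).mp hh
            rw [this]
            exact List.getElem_mem _
          exact absurd this (by simp at hnd; exact hnd.1)
    · rw [if_neg hp, List.find?_cons_of_neg hp]
      cases i with
      | zero =>
        simp only [List.getElem_cons_zero]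
        constructor
        · intro hh; simp at hh
        · intro hh
          have : k ∈ ks := List.mem_of_find?_eq_some hh
          exact absurd this (by simp at hnd; exact hnd.1)
      | succ j =>
        simp only [List.getElem_cons_succ, Option.map_eq_some_iff]
        rw [← ih (by simp at hnd; exact hnd.2) j (by simp only [List.length_cons] at h; omega)]
        constructor
        · rintro ⟨a, ha, heq⟩
          have : a = j := by omega
          rw [← this]; exact ha
        · intro hh; exact ⟨j, hh, rfl⟩

lemma pvSpecAux_snd (ks : List String) :
    ∀ (ls : List String) (rem : List PvE),
      (pvSpecAux ks ls rem).2
        = rem.filter (fun e => (ls.find? (fun l => pvGT ks l (pvTitle e))).isNone) := by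
  intro ls
  induction ls with
  | nil => intro rem; simp [pvSpecAux]
  | cons l ls ih =>
    intro rem
    show (pvSpecAux ks ls (rem.filter (fun e => !pvGT ks l (pvTitle e)))).2 = _
    rw [ih, List.filter_filter]
    apply List.filter_congr
    intro e _
    by_cases hg : pvGT ks l (pvTitle e) = true
    · simp [hg]
    · have hg' : pvGT ks l (pvTitle e) = false := by simpa using hg
      simp [hg']

lemma pvSpecAux_fst (ks : List String) :
    ∀ (ls : List String), ls.Nodup → ∀ (rem : List PvE),
      (pvSpecAux ks ls rem).1
        = (ls.map (fun l => rem.filter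
            (fun e => ls.find? (fun l' => pvGT ks l' (pvTitle e)) = some l))).flatten := by
  intro ls
  induction ls with
  | nil => intro _ rem; simp [pvSpecAux]
  | cons l ls ih =>
    intro hnd rem
    have hl : l ∉ ls := by simp at hnd; exact hnd.1
    show rem.filter (fun e => pvGT ks l (pvTitle e)) ++
        (pvSpecAux ks ls (rem.filter (fun e => !pvGT ks l (pvTitle e)))).1 = _
    rw [ih (by simp at hnd; exact hnd.2)]
    simp only [List.map_cons, List.flatten_cons]
    congr 1
    · apply List.filter_congr
      intro e _
      by_cases hg : pvGT ks l (pvTitle e) = true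
      · simp [hg]
      · have hg' : pvGT ks l (pvTitle e) = false := by simpa using hg
        simp only [List.find?_cons, hg']
        symm
        rw [decide_eq_false_iff_not]
        intro hh
        exact hl (List.mem_of_find?_eq_some hh)
    · congr 1
      apply List.map_congr_left
      intro l2 hl2
      rw [List.filter_filter]
      apply List.filter_congr
      intro e _
      by_cases hg : pvGT ks l (pvTitle e) = true
      · have hne : l ≠ l2 := fun hh => hl (hh ▸ hl2)
        simp [hg, hne]
      · have hg' : pvGT ks l (pvTitle e) = false := by simpa using hg
        simp [hg']

-- phase 2: the heading pass, step functions of the two ports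
def pvIStepA (labels : List (String × String))
    (s2 : PySem.Dict String String × List PvE × Option String) (root_pkg : String) :
    PySem.Dict String String × List PvE × Option String :=
  if PySem.Str.startswith (s2.1.getD "title" "") root_pkg then
    let new_title := pvLstripDot (PySem.Str.slice (s2.1.getD "title" "") (some (PySem.Str.len root_pkg)) none)
    let sec := ((PySem.Str.split? new_title ".").getD []).headD ""
    let oc :=
      if some sec ≠ s2.2.2 then
        let section_pkg := if sec ≠ "" then PySem.Str.join "" [root_pkg, ".", sec] else root_pkg
        (s2.2.1 ++ [[("heading", (PySem.Dict.mk labels).getD section_pkg sec)]], some sec)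
      else (s2.2.1, s2.2.2)
    (s2.1.insert "title" (if new_title = "" then root_pkg else new_title), oc.1, oc.2)
  else s2

def pvIStepB (labels : List (String × String))
    (s : String × Bool × List PvE × Option String) (rp : String) :
    String × Bool × List PvE × Option String :=
  if PySem.Str.startswith s.1 rp then
    let nt := pvLstripDot (PySem.Str.slice s.1 (some (PySem.Str.len rp)) none)
    let sec := ((PySem.Str.split? nt ".").getD []).headD ""
    let oc :=
      if some sec ≠ s.2.2.2 then
        let key := if sec ≠ "" then PySem.Str.join "" [rp, ".", sec] else rp
        (s.2.2.1 ++ [[("heading", (PySem.Dict.mk labels).getD key sec)]], some sec)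
      else (s.2.2.1, s.2.2.2)
    ((if nt = "" then rp else nt), true, oc.1, oc.2)
  else s

-- shared values of one accepted step
def pvNt (t rp : String) : String := pvLstripDot (PySem.Str.slice t (some (PySem.Str.len rp)) none)
def pvSec (nt : String) : String := ((PySem.Str.split? nt ".").getD []).headD ""
def pvHead (labels : List (String × String)) (rp sec : String) (out : List PvE)
    (cur : Option String) : List PvE × Option String :=
  if some sec ≠ cur then
    (out ++ [[("heading", (PySem.Dict.mk labels).getD
        (if sec ≠ "" then PySem.Str.join "" [rp, ".", sec] else rp) sec)]], some sec)
  else (out, cur)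

lemma pvIStepA_pos (labels : List (String × String)) (ne : PySem.Dict String String)
    (out : List PvE) (cur : Option String) (rp : String)
    (h : PySem.Str.startswith (ne.getD "title" "") rp = true) :
    pvIStepA labels (ne, out, cur) rp =
      (ne.insert "title"
        (if pvNt (ne.getD "title" "") rp = "" then rp else pvNt (ne.getD "title" "") rp),
       (pvHead labels rp (pvSec (pvNt (ne.getD "title" "") rp)) out cur).1,
       (pvHead labels rp (pvSec (pvNt (ne.getD "title" "") rp)) out cur).2) := by
  simp only [pvIStepA, pvNt, pvSec, pvHead, h, if_true]

lemma pvIStepA_neg (labels : List (String × String)) (ne : PySem.Dict String String)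
    (out : List PvE) (cur : Option String) (rp : String)
    (h : PySem.Str.startswith (ne.getD "title" "") rp = false) :
    pvIStepA labels (ne, out, cur) rp = (ne, out, cur) := by
  simp only [pvIStepA, h, Bool.false_eq_true, if_false]

lemma pvIStepB_pos (labels : List (String × String)) (t : String) (m : Bool)
    (out : List PvE) (cur : Option String) (rp : String)
    (h : PySem.Str.startswith t rp = true) :
    pvIStepB labels (t, m, out, cur) rp =
      ((if pvNt t rp = "" then rp else pvNt t rp), true,
       (pvHead labels rp (pvSec (pvNt t rp)) out cur).1,
       (pvHead labels rp (pvSec (pvNt t rp)) out cur).2) := by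
  simp only [pvIStepB, pvNt, pvSec, pvHead, h, if_true]

lemma pvIStepB_neg (labels : List (String × String)) (t : String) (m : Bool)
    (out : List PvE) (cur : Option String) (rp : String)
    (h : PySem.Str.startswith t rp = false) :
    pvIStepB labels (t, m, out, cur) rp = (t, m, out, cur) := by
  simp only [pvIStepB, h, Bool.false_eq_true, if_false]

lemma pvInner2 (labels : List (String × String)) (entry : PvE) :
    ∀ (rps : List String) (t : String) (m : Bool) (out : List PvE) (cur : Option String),
      (m = false → t = pvTitle entry) →
      rps.foldl (pvIStepA labels)
        ((if m then (PySem.Dict.mk entry).insert "title" t else PySem.Dict.mk entry), out, cur)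
      = ((if (rps.foldl (pvIStepB labels) (t, m, out, cur)).2.1 then
            (PySem.Dict.mk entry).insert "title" (rps.foldl (pvIStepB labels) (t, m, out, cur)).1
          else PySem.Dict.mk entry),
         (rps.foldl (pvIStepB labels) (t, m, out, cur)).2.2.1,
         (rps.foldl (pvIStepB labels) (t, m, out, cur)).2.2.2) := by
  intro rps
  induction rps with
  | nil => intro t m out cur hm; simp
  | cons rp rps ih =>
    intro t m out cur hm
    have hread : ((if m then (PySem.Dict.mk entry).insert "title" t
        else PySem.Dict.mk entry) : PySem.Dict String String).getD "title" "" = t := by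
      cases m
      · simpa [pvTitle] using (hm rfl).symm
      · simp [PySem.Dict.getD_insert_self]
    rw [List.foldl_cons, List.foldl_cons]
    by_cases hsw : PySem.Str.startswith t rp = true
    · rw [pvIStepA_pos labels _ out cur rp (by rw [hread]; exact hsw), hread,
        pvIStepB_pos labels t m out cur rp hsw]
      have hcomb : ((if m then (PySem.Dict.mk entry).insert "title" t
          else PySem.Dict.mk entry) : PySem.Dict String String).insert "title"
            (if pvNt t rp = "" then rp else pvNt t rp)
          = (if true then (PySem.Dict.mk entry).insert "title"
              (if pvNt t rp = "" then rp else pvNt t rp) else PySem.Dict.mk entry) := by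
        cases m
        · simp
        · simp [PySem.Dict.insert_insert_self]
      rw [hcomb]
      exact ih (if pvNt t rp = "" then rp else pvNt t rp) true
        (pvHead labels rp (pvSec (pvNt t rp)) out cur).1
        (pvHead labels rp (pvSec (pvNt t rp)) out cur).2 (by simp)
    · have hsw' : PySem.Str.startswith t rp = false := by simpa using hsw
      rw [pvIStepA_neg labels _ out cur rp (by rw [hread]; exact hsw'),
        pvIStepB_neg labels t m out cur rp hsw']
      exact ih t m out cur hm

def pvEStepA (labels : List (String × String)) (root_pkgs : List String)
    (st : List PvE × Option String) (entry : PvE) : List PvE × Option String :=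
  let inner := root_pkgs.foldl (pvIStepA labels) (PySem.Dict.mk entry, st.1, st.2)
  (inner.2.1 ++ [inner.1.items], inner.2.2)

def pvEStepB (labels : List (String × String)) (root_pkgs : List String)
    (st : List PvE × Option String) (entry : PvE) : List PvE × Option String :=
  let inner := root_pkgs.foldl (pvIStepB labels) (pvTitle entry, false, st.1, st.2)
  let e2 := if inner.2.1 then (PySem.Dict.mk entry).insert "title" inner.1 else PySem.Dict.mk entry
  (inner.2.2.1 ++ [e2.items], inner.2.2.2)

lemma pvEStep_eq (labels : List (String × String)) (rps : List String)
    (st : List PvE × Option String) (entry : PvE) :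
    pvEStepA labels rps st entry = pvEStepB labels rps st entry := by
  unfold pvEStepA pvEStepB
  have h := pvInner2 labels entry rps (pvTitle entry) false st.1 st.2 (fun _ => rfl)
  simp only [Bool.false_eq_true, if_false] at h
  simp only [h]

lemma pvPhase2_eq (labels : List (String × String)) (rps : List String) :
    ∀ (lst : List PvE) (st : List PvE × Option String),
      lst.foldl (pvEStepA labels rps) st = lst.foldl (pvEStepB labels rps) st := by
  intro lst
  induction lst with
  | nil => intro st; rfl
  | cons e es ih =>
    intro st
    rw [List.foldl_cons, List.foldl_cons, pvEStep_eq, ih]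

-- assembling phase 1
lemma pvDictToc (x : List PvE) : (PySem.Dict.mk [("toc", x)]).getD "toc" [] = x := by
  simp [PySem.Dict.getD, PySem.Dict.get?]

lemma pvPhase1_eq (toc : List (String × List PvE)) (ks : List String) (hks : ks.Nodup) :
    (PySem.Dict.mk (pvSortTocA toc ks)).getD "toc" []
      = (let br := ((PySem.Dict.mk toc).getD "toc" []).foldl (pvBStep ks)
           (ks.map (fun _ => []), []);
         br.1.flatten ++ br.2) := by
  have hentries : ∀ entries : List PvE,
      (pvSpecAux ks ks entries).1 ++ (pvSpecAux ks ks entries).2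
        = (entries.foldl (pvBStep ks) (ks.map (fun _ => []), [])).1.flatten ++
          (entries.foldl (pvBStep ks) (ks.map (fun _ => []), [])).2 := by
    intro entries
    rw [pvBuckets ks entries _ [] (by simp), pvSpecAux_fst ks ks hks, pvSpecAux_snd ks ks]
    congr 1
    · congr 1
      apply List.ext_getElem
      · simp
      · intro i h1 h2
        have hik : i < ks.length := by simpa using h1
        simp only [List.getElem_mapIdx, List.getElem_map, List.nil_append]
        apply List.filter_congr
        intro e _
        simp only [decide_eq_decide]
        exact (pvFindIdx?_find? (fun l' => pvGT ks l' (pvTitle e)) ks hks i hik).symm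
    · rw [List.nil_append]
      apply List.filter_congr
      intro e _
      rcases hfg : pvFg ks (pvTitle e) with _ | i
      · unfold pvFg at hfg
        rw [List.findIdx?_eq_none_iff] at hfg
        have : ks.find? (fun l => pvGT ks l (pvTitle e)) = none :=
          List.find?_eq_none.mpr (fun x hx => by simp [hfg x hx])
        simp [this]
      · have hik : i < ks.length := pvFg_lt ks (pvTitle e) hfg
        have := (pvFindIdx?_find? (fun l' => pvGT ks l' (pvTitle e)) ks hks i hik).mp hfg
        simp [this]
  rw [pvSortTocA_eq, pvDictToc]
  have h := pvOuterA ks ks [] ((PySem.Dict.mk toc).getD "toc" [])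
  rw [h]
  simpa using hentries ((PySem.Dict.mk toc).getD "toc" [])

lemma pvA_main (toc : List (String × List PvE)) (rps : List String)
    (labels : List (String × String)) :
    add_package_headings toc rps labels =
      [("toc",
        (((PySem.Dict.mk (pvSortTocA toc (PySem.List.dedup (labels.map (fun p => p.1))))).getD
            "toc" []).foldl
          (pvEStepA labels rps) ([], none)).1)] := rfl

lemma pvB_main (toc : List (String × List PvE)) (rps : List String)
    (labels : List (String × String)) :
    add_package_headings_alt toc rps labels =
      [("toc",
        ((let br := ((PySem.Dict.mk toc).getD "toc" []).foldl
            (pvBStep (PySem.List.dedup (labels.map (fun p => p.1))))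
            ((PySem.List.dedup (labels.map (fun p => p.1))).map (fun _ => []), []);
          br.1.flatten ++ br.2).foldl
          (pvEStepB labels rps) ([], none)).1)] := rfl


-- ===== VERDICT (by name: the statement is the Claim_ definition above) =====
theorem add_package_headings_spec : Claim_equal_add_package_headings := by
  intro toc rps labels _ _
  unfold Spec_add_package_headings
  rw [pvA_main, pvB_main,
    pvPhase1_eq toc (PySem.List.dedup (labels.map (fun p => p.1)))
      (PySem.List.nodup_dedup _),
    pvPhase2_eq]
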